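-- pv_equiv track=rewrite | github.com/PeterRatgen/artificial_intelligence | labs/week11/homework/nim_game.py | successors_of
-- ===== SOURCE A (Python) =====
-- def flatten(arr):
--     flat = []
--     for j in arr:
--         if type(j) == list:
--             for k in j:
--                 flat.append(k)
--         else:
--             flat.append(j)
--     return flat
--
-- def expand(param):
--     return_arr = []
--     for i in range(1, param // 2 + 1):
--         add_arr = sorted([param - i, i - 0], reverse=True)
--         if add_arr[0] == add_arr[1]:
--             continue
--         return_arr.append(add_arr)
--     if len(return_arr) == 0:
--         return_arr = [[]]
--     return return_arr
--
-- def successors_of(state):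
--     """
--     returns a list of tuples (move, state) as shown in the exercise slides
--     :param state: State of the checkerboard. Ex: [0; 1; 2; 3; X; 5; 6; 7; 8]
--     :return:
--     """
--     return_state = []
--
--     for i in range(len(state)):
--         expanded = expand(state[i])
--         if len(expanded[0]) != 0:
--             for item in expanded:
--                 new_state = state[:]
--                 new_state[i] = item
--                 new_state = flatten(new_state)
--                 new_state = sorted(new_state, reverse=True)
--                 return_state.append(new_state)
--
--     return return_state
-- ===== SOURCE B (Python) =====
-- def _merge_desc(xs, ys):
--     """Merge two descending-sorted lists into one descending-sorted list."""
--     res = []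
--     a = b = 0
--     while a < len(xs) and b < len(ys):
--         if xs[a] >= ys[b]:
--             res.append(xs[a]); a += 1
--         else:
--             res.append(ys[b]); b += 1
--     res.extend(xs[a:])
--     res.extend(ys[b:])
--     return res
--
-- def successors_of(state):
--     """
--     returns a list of tuples (move, state) as shown in the exercise slides
--     :param state: State of the checkerboard. Ex: [0; 1; 2; 3; X; 5; 6; 7; 8]
--     :return:
--     """
--     out = []
--     for i, p in enumerate(state):
--         if p < 3:
--             continue
--         rest = sorted(state[:i] + state[i + 1:], reverse=True)
--         out.extend(_merge_desc(rest, [p - k, k]) for k in range(1, (p - 1) // 2 + 1))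
--     return out
-- ===== Notes on version B (the rewrite author's own statement) =====
-- stated objective: alternative
-- what changed: Instead of flattening and fully re-sorting the whole state for every successor (and re-deriving each split via a tiny sort inside expand), B sorts the remaining piles once per pile index and produces each successor by a linear merge of that sorted rest with the two split parts.
import Mathlib
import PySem

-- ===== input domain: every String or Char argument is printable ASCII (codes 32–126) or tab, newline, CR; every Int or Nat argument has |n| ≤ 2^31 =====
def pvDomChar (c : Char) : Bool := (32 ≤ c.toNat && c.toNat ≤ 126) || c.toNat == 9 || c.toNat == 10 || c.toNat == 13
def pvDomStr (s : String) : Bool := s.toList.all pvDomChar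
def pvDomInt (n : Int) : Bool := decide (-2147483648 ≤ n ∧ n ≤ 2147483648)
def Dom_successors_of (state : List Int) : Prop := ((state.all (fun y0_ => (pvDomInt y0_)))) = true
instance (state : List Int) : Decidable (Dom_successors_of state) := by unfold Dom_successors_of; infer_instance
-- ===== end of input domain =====

-- B sorts the remaining piles once per pile and merges the two split parts in,
-- instead of flattening and fully re-sorting the whole state for every successor.

-- ===== PORT A =====
-- Python's new_state is a heterogeneous list (ints plus one inserted pair list); ported as List (Int ⊕ List Int)
def pyFlatten (arr : List (Int ⊕ List Int)) : List Int :=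
  arr.foldl (fun flat j =>
    match j with
    | Sum.inr l => l.foldl (fun f k => f ++ [k]) flat
    | Sum.inl x => flat ++ [x]) []

def expand (param : Int) : List (List Int) :=
  let ra := (PySem.List.pyRange 1 (PySem.Int.floordiv param 2 + 1) 1).foldl
    (fun acc i =>
      let addArr := PySem.List.sorted [param - i, i - 0] (fun x => x) true
      -- addArr has length 2, so the Python indexings addArr[0], addArr[1] never raise
      if PySem.List.pyGetD addArr 0 0 = PySem.List.pyGetD addArr 1 0 then acc
      else acc ++ [addArr]) []
  if ra.length = 0 then [[]] else ra

def successors_of (state : List Int) : List (List Int) :=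
  (PySem.List.pyRange 0 (state.length : Int) 1).foldl
    (fun rs i =>
      -- indices from range(len(state)) are in range, so state[i] / new_state[i] = item never raise
      let expanded := expand (PySem.List.pyGetD state i 0)
      if (PySem.List.pyGetD expanded 0 []).length ≠ 0 then
        expanded.foldl (fun rs item =>
          let ns0 : List (Int ⊕ List Int) :=
            PySem.List.pySetD (state.map Sum.inl) i (Sum.inr item)
          rs ++ [PySem.List.sorted (pyFlatten ns0) (fun x => x) true]) rs
      else rs) []

-- ===== PORT B =====
def mergeDesc : List Int → List Int → List Int
  | [], ys => ys
  | x :: xs, [] => x :: xs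
  | x :: xs, y :: ys =>
    if x ≥ y then x :: mergeDesc xs (y :: ys)
    else y :: mergeDesc (x :: xs) ys

def successors_of_alt (state : List Int) : List (List Int) :=
  (PySem.List.enumerate state 0).foldl
    (fun out ip =>
      if ip.2 < 3 then out
      else
        let rest := PySem.List.sorted
          (PySem.List.slice state none (some ip.1) ++ PySem.List.slice state (some (ip.1 + 1)) none)
          (fun x => x) true
        out ++ (PySem.List.pyRange 1 (PySem.Int.floordiv (ip.2 - 1) 2 + 1) 1).map
          (fun k => mergeDesc rest [ip.2 - k, k])) []

-- ===== PRECONDITION & SPEC =====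
def Spec_successors_of (state : List Int) (out : List (List Int)) : Prop := out = successors_of_alt state
instance (state : List Int) (out : List (List Int)) : Decidable (Spec_successors_of state out) := by unfold Spec_successors_of; infer_instance

-- ===== CLAIM (what is proved, stated in full; the proofs are below) =====
def Claim_equal_successors_of : Prop := ∀ (state : List Int), Dom_successors_of state → Spec_successors_of state (successors_of state)

-- ===== LEMMAS AND PROOFS =====

theorem pyFlatten_eq (arr : List (Int ⊕ List Int)) :
    pyFlatten arr = arr.flatMap (fun j => match j with | Sum.inl x => [x] | Sum.inr l => l) := by
  unfold pyFlatten
  refine Eq.trans (PySem.List.foldl_congr_mem arr _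
      (fun flat j => flat ++ (match j with | Sum.inl x => [x] | Sum.inr l => l)) []
      (fun acc x _ => by
        cases x with
        | inl v => rfl
        | inr l => exact PySem.List.foldl_append_singleton_eq_self l acc)) ?_
  rw [PySem.List.foldl_append_eq_flatMap]
  simp

theorem mergeDesc_perm (xs ys : List Int) : (mergeDesc xs ys).Perm (xs ++ ys) := by
  induction xs, ys using mergeDesc.induct with
  | case1 ys => simp [mergeDesc]
  | case2 x xs => simp [mergeDesc]
  | case3 x xs y ys h ih => simpa [mergeDesc, h] using ih.cons x
  | case4 x xs y ys h ih =>
    simp only [mergeDesc, h]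
    refine (ih.cons y).trans ?_
    simpa using ((List.perm_middle (a := y) (l₁ := x :: xs) (l₂ := ys)).symm)

theorem mergeDesc_pairwise (xs ys : List Int)
    (hx : xs.Pairwise (fun a b => b ≤ a)) (hy : ys.Pairwise (fun a b => b ≤ a)) :
    (mergeDesc xs ys).Pairwise (fun a b => b ≤ a) := by
  induction xs, ys using mergeDesc.induct with
  | case1 ys => simpa [mergeDesc] using hy
  | case2 x xs => simpa [mergeDesc] using hx
  | case3 x xs y ys h ih =>
    simp only [mergeDesc, h, if_pos]
    refine List.pairwise_cons.mpr ⟨?_, ih hx.of_cons hy⟩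
    intro z hz
    have hz' : z ∈ xs ++ (y :: ys) := (mergeDesc_perm xs (y :: ys)).mem_iff.mp hz
    rcases List.mem_append.mp hz' with h1 | h2
    · exact (List.pairwise_cons.mp hx).1 z h1
    · rcases List.mem_cons.mp h2 with rfl | h3
      · omega
      · have := (List.pairwise_cons.mp hy).1 z h3
        omega
  | case4 x xs y ys h ih =>
    simp only [mergeDesc, h]
    refine List.pairwise_cons.mpr ⟨?_, ih hx hy.of_cons⟩
    intro z hz
    have hz' : z ∈ (x :: xs) ++ ys := (mergeDesc_perm (x :: xs) ys).mem_iff.mp hz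
    rcases List.mem_append.mp hz' with h1 | h2
    · rcases List.mem_cons.mp h1 with rfl | h3
      · omega
      · have := (List.pairwise_cons.mp hx).1 z h3
        omega
    · exact (List.pairwise_cons.mp hy).1 z h2
theorem expand_lt_three (p : Int) (hp : p < 3) : expand p = [[]] := by
  rcases eq_or_lt_of_le (show p ≤ 2 by omega) with h2 | h1
  · subst h2; decide
  · have hb : PySem.Int.floordiv p 2 + 1 ≤ 1 := by
      rw [PySem.Int.floordiv_eq_ediv_of_pos (by omega : (0:Int) < 2)]
      omega
    simp only [expand]
    rw [PySem.List.pyRange_one_eq_nil hb]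
    simp

theorem expand_ge_three (p : Int) (hp : 3 ≤ p) :
    expand p = (PySem.List.pyRange 1 (PySem.Int.floordiv (p - 1) 2 + 1) 1).map
      (fun k => [p - k, k]) := by
  have hd : PySem.Int.floordiv p 2 = p / 2 := PySem.Int.floordiv_eq_ediv_of_pos (by omega)
  have hd' : PySem.Int.floordiv (p - 1) 2 = (p - 1) / 2 := PySem.Int.floordiv_eq_ediv_of_pos (by omega)
  simp only [expand]
  rw [PySem.List.foldl_congr_mem _ _
      (fun acc i => if p - i ≠ i then acc ++ [[p - i, i]] else acc) []
      (fun acc i hi => by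
        rw [PySem.List.mem_pyRange_one] at hi
        have hle : i ≤ p - i := by omega
        have hs : PySem.List.sorted [p - i, i - 0] (fun x => x) true = [p - i, i] := by
          rw [show i - 0 = i by ring]
          exact PySem.List.sorted_rev_eq_self_of_pairwise _ _ (by simp [hle])
        simp only [hs]
        have g0 : PySem.List.pyGetD [p - i, i] 0 0 = p - i := by
          rw [PySem.List.pyGetD_eq_getElem _ _ (by omega) (by simp)]; rfl
        have g1 : PySem.List.pyGetD [p - i, i] 1 0 = i := by
          rw [PySem.List.pyGetD_eq_getElem _ _ (by omega) (by simp)]; rfl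
        rw [g0, g1]
        by_cases h : p - i = i <;> simp [h])]
  rw [PySem.List.foldl_append_ite (fun i => p - i ≠ i) (fun i => [p - i, i])]
  have hfilter : (PySem.List.pyRange 1 (PySem.Int.floordiv p 2 + 1) 1).filter
      (fun i => decide (p - i ≠ i)) = PySem.List.pyRange 1 (PySem.Int.floordiv (p - 1) 2 + 1) 1 := by
    rw [hd, hd']
    rcases Int.emod_two_eq_zero_or_one p with he | ho
    · -- p even: last element p/2 is dropped
      have h1d : (1:Int) ≤ p / 2 := by omega
      rw [show p / 2 + 1 = (p / 2) + 1 from rfl, PySem.List.pyRange_one_succ_right h1d,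
        List.filter_append]
      have hall : (PySem.List.pyRange 1 (p / 2) 1).filter (fun i => decide (p - i ≠ i))
          = PySem.List.pyRange 1 (p / 2) 1 := by
        apply List.filter_eq_self.mpr
        intro x hx
        rw [PySem.List.mem_pyRange_one] at hx
        simp only [decide_eq_true_eq]
        omega
      have hlast : ([p / 2] : List Int).filter (fun i => decide (p - i ≠ i)) = [] := by
        simp only [List.filter_cons, List.filter_nil]
        have : p - p / 2 = p / 2 := by omega
        simp [this]
      rw [hall, hlast, List.append_nil]
      have : (p - 1) / 2 + 1 = p / 2 := by omega
      rw [this]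
    · -- p odd: nothing dropped
      have : (p - 1) / 2 = p / 2 := by omega
      rw [this]
      apply List.filter_eq_self.mpr
      intro x hx
      rw [PySem.List.mem_pyRange_one] at hx
      simp only [decide_eq_true_eq]
      omega
  rw [hfilter]
  have hne : ((PySem.List.pyRange 1 (PySem.Int.floordiv (p - 1) 2 + 1) 1).map
      (fun k => [p - k, k])).length ≠ 0 := by
    rw [List.length_map, PySem.List.length_pyRange_one, hd']
    omega
  simp only [List.nil_append]
  rw [if_neg hne]
theorem item_eq (state : List Int) (i p k : Int) (h0 : 0 ≤ i) (h1 : i < (state.length : Int))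
    (hpk : k ≤ p - k) :
    PySem.List.sorted
      (pyFlatten (PySem.List.pySetD (state.map Sum.inl) i (Sum.inr [p - k, k]))) (fun x => x) true
    = mergeDesc
        (PySem.List.sorted
          (PySem.List.slice state none (some i) ++ PySem.List.slice state (some (i + 1)) none)
          (fun x => x) true)
        [p - k, k] := by
  have hm : i.toNat < state.length := by omega
  have hset : PySem.List.pySetD (state.map Sum.inl) i (Sum.inr [p - k, k])
      = (state.take i.toNat).map Sum.inl ++ Sum.inr [p - k, k] :: (state.drop (i.toNat + 1)).map Sum.inl := by
    rw [PySem.List.pySetD_of_nonneg _ _ h0, List.set_eq_take_append_cons_drop,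
      if_pos (by simpa using hm), List.map_take, List.map_drop]
  have hsingle : ∀ (l : List Int),
      l.flatMap (fun x => ([x] : List Int)) = l := by
    intro l
    induction l with
    | nil => rfl
    | cons a t ih => simp [ih]
  have hinl : ∀ (l : List Int),
      (l.map Sum.inl).flatMap
        (fun j => match j with | Sum.inl x => ([x] : List Int) | Sum.inr m => m) = l := by
    intro l
    rw [List.flatMap_map]
    exact hsingle l
  have hflat : pyFlatten (PySem.List.pySetD (state.map Sum.inl) i (Sum.inr [p - k, k]))
      = state.take i.toNat ++ [p - k, k] ++ state.drop (i.toNat + 1) := by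
    rw [hset, pyFlatten_eq, List.flatMap_append, List.flatMap_cons, hinl, hinl,
      List.append_assoc]
  have hslice : PySem.List.slice state none (some i) ++ PySem.List.slice state (some (i + 1)) none
      = state.take i.toNat ++ state.drop (i.toNat + 1) := by
    rw [PySem.List.slice_to _ h0, PySem.List.slice_from _ (by omega : (0:Int) ≤ i + 1)]
    congr 2
    omega
  rw [hflat, hslice]
  have hmid : (state.take i.toNat ++ [p - k, k] ++ state.drop (i.toNat + 1)).Perm
      ((state.take i.toNat ++ state.drop (i.toNat + 1)) ++ [p - k, k]) := by
    rw [List.append_assoc]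
    refine (List.Perm.append_left _ List.perm_append_comm).trans ?_
    rw [← List.append_assoc]
  have hpair : ([p - k, k] : List Int).Pairwise (fun a b => b ≤ a) := by
    simpa using hpk
  refine PySem.List.eq_of_perm_of_pairwise_le_of_injective (Neg.neg : Int → Int) neg_injective
    ?_ ?_ ?_
  · exact (PySem.List.sorted_perm _ _ _).trans (hmid.trans
      ((((PySem.List.sorted_perm _ _ _).symm).append_right _).trans (mergeDesc_perm _ _).symm))
  · exact (PySem.List.sorted_pairwise_rev _ _).imp (fun hab => by omega)
  · exact (mergeDesc_pairwise _ _ (PySem.List.sorted_pairwise_rev _ _) hpair).imp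
      (fun hab => by omega)
theorem main_eq (state : List Int) : successors_of state = successors_of_alt state := by
  unfold successors_of successors_of_alt
  rw [PySem.List.enumerate_eq_map_pyRange state 0, PySem.List.len_eq, List.foldl_map]
  refine PySem.List.foldl_congr_mem _ _ _ [] ?_
  intro acc i hi
  rw [PySem.List.mem_pyRange_one] at hi
  obtain ⟨hi0, hi1⟩ := hi
  simp only
  by_cases hlt : PySem.List.pyGetD state i 0 < 3
  · rw [expand_lt_three _ hlt, if_pos hlt]
    norm_num
  · have hge : 3 ≤ PySem.List.pyGetD state i 0 := by omega
    set p := PySem.List.pyGetD state i 0 with hp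
    rw [expand_ge_three p hge, if_neg hlt]
    have hd' : PySem.Int.floordiv (p - 1) 2 = (p - 1) / 2 :=
      PySem.Int.floordiv_eq_ediv_of_pos (by omega)
    have hguard : (PySem.List.pyGetD ((PySem.List.pyRange 1 (PySem.Int.floordiv (p - 1) 2 + 1) 1).map
        (fun k => [p - k, k])) 0 []).length ≠ 0 := by
      rw [PySem.List.pyRange_one_cons (by rw [hd']; omega : (1:Int) < PySem.Int.floordiv (p - 1) 2 + 1)]
      rw [List.map_cons, PySem.List.pyGetD_eq_getElem _ _ (by omega) (by simp)]
      simp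
    rw [if_pos hguard, PySem.List.foldl_append_singleton_eq_map, List.map_map]
    congr 1
    refine List.map_congr_left ?_
    intro k hk
    rw [PySem.List.mem_pyRange_one, hd'] at hk
    exact item_eq state i p k hi0 hi1 (by omega)

-- ===== VERDICT (by name: the statement is the Claim_ definition above) =====
theorem successors_of_spec : Claim_equal_successors_of := by
  intro state _
  unfold Spec_successors_of
  exact main_eq state
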